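-- pv_equiv track=rewrite | github.com/a-gavriel/Python-Games | Clases/Clases-Ejecicios/Soluciones/E4a.py | revise_aux_L
-- ===== SOURCE A (Python) =====
-- def revise_aux_L(num):
-- 	if num == 0:
-- 		return 0
-- 	else:
-- 		ultimo = num%10
-- 		if ultimo < 5 :
-- 			return 1 + revise_aux_L(num//10)
-- 		else:
-- 			return revise_aux_L(num//10)
-- ===== SOURCE B (Python) =====
-- def revise_aux_L(num):
--     digits = []
--     while num != 0:
--         digits.append(num % 10)
--         num //= 10
--     return sum(1 for d in digits if d < 5)
-- ===== Notes on version B (the rewrite author's own statement) =====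
-- stated objective: alternative
-- what changed: Replaces the recursion that counts while decomposing with a two-stage pipeline: first an iterative loop materialises the digit list, then a separate pass counts the digits below 5.
-- outside the precondition, e.g. on revise_aux_L(-7): A raises RecursionError, B does not finish within the time limit
import Mathlib
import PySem

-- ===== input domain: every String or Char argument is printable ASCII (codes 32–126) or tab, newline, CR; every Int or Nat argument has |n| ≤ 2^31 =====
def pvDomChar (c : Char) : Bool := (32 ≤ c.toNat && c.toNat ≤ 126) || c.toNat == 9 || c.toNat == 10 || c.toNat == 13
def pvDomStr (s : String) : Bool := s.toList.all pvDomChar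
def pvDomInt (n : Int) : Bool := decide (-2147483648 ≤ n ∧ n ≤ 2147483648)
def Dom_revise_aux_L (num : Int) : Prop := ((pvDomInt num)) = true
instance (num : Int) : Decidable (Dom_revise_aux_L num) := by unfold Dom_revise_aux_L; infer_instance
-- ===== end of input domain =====

-- B splits A's counting recursion into two stages: build the digit list iteratively, then count digits < 5 (objective: alternative).


-- ===== PORT A =====
-- Literal port of A's recursion; on negative num Python A recurses forever (RecursionError),
-- so the ≤ 0 guard only makes the port total there — those inputs are outside Pre_.
def revise_aux_L (num : Int) : Int :=
  if _h : num ≤ 0 then 0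
  else
    let ultimo := PySem.Int.mod num 10
    if ultimo < 5 then 1 + revise_aux_L (PySem.Int.floordiv num 10)
    else revise_aux_L (PySem.Int.floordiv num 10)
termination_by num.toNat
decreasing_by
  all_goals
    have h10 : (0:Int) < 10 := by norm_num
    rw [PySem.Int.floordiv_eq_ediv_of_pos h10]
    omega

-- ===== PORT B =====
-- Stage 1 of Source B: the while-loop that appends num % 10 and divides, producing the digit list.
-- Same totality guard for negative num (the Python loop never terminates there; outside Pre_).
def digitList (num : Int) : List Int :=
  if _h : num ≤ 0 then []
  else PySem.Int.mod num 10 :: digitList (PySem.Int.floordiv num 10)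
termination_by num.toNat
decreasing_by
  have h10 : (0:Int) < 10 := by norm_num
  rw [PySem.Int.floordiv_eq_ediv_of_pos h10]
  omega

-- Stage 2 of Source B: sum(1 for d in digits if d < 5) = count of digits below 5.
def revise_aux_L_alt (num : Int) : Int :=
  ((digitList num).countP (fun d => d < 5) : Nat)

-- ===== PRECONDITION & SPEC =====
-- A raises RecursionError on negative num (num//10 stays -1 forever), so Pre_ admits 0 ≤ num.
def Pre_revise_aux_L (num : Int) : Prop := 0 ≤ num
instance (num : Int) : Decidable (Pre_revise_aux_L num) := by unfold Pre_revise_aux_L; infer_instance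
def pvWitness_revise_aux_L : Int := (12345)
def Spec_revise_aux_L (num : Int) (out : Int) : Prop := out = revise_aux_L_alt num
instance (num : Int) (out : Int) : Decidable (Spec_revise_aux_L num out) := by unfold Spec_revise_aux_L; infer_instance

-- ===== CLAIM (what is proved, stated in full; the proofs are below) =====
def Claim_equal_revise_aux_L : Prop := ∀ (num : Int), Dom_revise_aux_L num → Pre_revise_aux_L num → Spec_revise_aux_L num (revise_aux_L num)

-- ===== LEMMAS AND PROOFS =====

theorem countP_digitList (num : Int) :
    revise_aux_L num = ((digitList num).countP (fun d => d < 5) : Nat) := by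
  induction num using revise_aux_L.induct with
  | case1 num h =>
      rw [revise_aux_L, digitList]
      simp [h]
  | case2 num h ultimo hlt ih =>
      rw [revise_aux_L, digitList, dif_neg h, dif_neg h]
      simp only [List.countP_cons, ih]
      by_cases h5 : num % 10 < 5 <;> simp [h5] <;> push_cast <;> ring
  | case3 num h ultimo hge ih =>
      rw [revise_aux_L, digitList, dif_neg h, dif_neg h]
      simp only [List.countP_cons, ih]
      by_cases h5 : num % 10 < 5 <;> simp [h5] <;> push_cast <;> ring

-- ===== VERDICT (by name: the statement is the Claim_ definition above) =====
theorem revise_aux_L_spec : Claim_equal_revise_aux_L := by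
  intro num _ _
  unfold Spec_revise_aux_L revise_aux_L_alt
  exact countP_digitList num
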